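-- pv_equiv track=rewrite | github.com/olga3n/adventofcode | 2023/day_16_the_floor_will_be_lava_2.py | max_energized_tiles
-- ===== SOURCE A (Python) =====
-- from typing import List, Tuple
--
-- NEXT_DIFF = {
--     '>': (0, 1),
--     '<': (0, -1),
--     'v': (1, 0),
--     '^': (-1, 0)
-- }
--
-- ROTATIONS = {
--     ('>', '|'): ('^', 'v'),
--     ('<', '|'): ('^', 'v'),
--     ('v', '-'): ('<', '>'),
--     ('^', '-'): ('<', '>'),
--     ('>', '/'): ('^',),
--     ('<', '/'): ('v',),
--     ('v', '/'): ('<',),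
--     ('^', '/'): ('>',),
--     ('>', '\\'): ('v',),
--     ('<', '\\'): ('^',),
--     ('v', '\\'): ('>',),
--     ('^', '\\'): ('<',),
-- }
--
-- def energized_tiles(
--     data: List[str], start_view: str, start_pos: Tuple[int, int]
-- ) -> int:
--     visited = {}
--
--     symbol = data[start_pos[0]][start_pos[1]]
--     beams = [
--         (start_view, start_pos)
--         for view in ROTATIONS.get((start_view, symbol), (start_view,))
--     ]
--
--     while len(beams):
--         new_beams = []
--
--         for view, (x, y) in beams:
--             if (x, y) in visited:
--                 if view in visited[(x, y)]:
--                     continue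
--                 else:
--                     visited[(x, y)].add(view)
--             else:
--                 visited[(x, y)] = {view}
--             dx, dy = NEXT_DIFF[view]
--             new_x, new_y = x + dx, y + dy
--             if not (0 <= new_x < len(data) and 0 <= new_y < len(data[0])):
--                 continue
--             for new_view in ROTATIONS.get((view, data[new_x][new_y]), (view,)):
--                 new_beams.append((new_view, (new_x, new_y)))
--
--         beams = new_beams
--
--     return len(visited)
--
-- def max_energized_tiles(data: List[str]) -> int:
--     result = 0
--
--     for i in range(0, len(data)):
--         result = max(result, energized_tiles(data, '>', (i, 0)))
--         result = max(result, energized_tiles(data, '<', (i, len(data[0]) - 1)))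
--
--     for j in range(0, len(data[0])):
--         result = max(result, energized_tiles(data, 'v', (0, j)))
--         result = max(result, energized_tiles(data, '^', (len(data) - 1, j)))
--
--     return result
-- ===== SOURCE B (Python) =====
-- from typing import List, Tuple
--
-- NEXT_DIFF = {
--     '>': (0, 1),
--     '<': (0, -1),
--     'v': (1, 0),
--     '^': (-1, 0)
-- }
--
-- ROTATIONS = {
--     ('>', '|'): ('^', 'v'),
--     ('<', '|'): ('^', 'v'),
--     ('v', '-'): ('<', '>'),
--     ('^', '-'): ('<', '>'),
--     ('>', '/'): ('^',),
--     ('<', '/'): ('v',),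
--     ('v', '/'): ('<',),
--     ('^', '/'): ('>',),
--     ('>', '\\'): ('v',),
--     ('<', '\\'): ('^',),
--     ('v', '\\'): ('>',),
--     ('^', '\\'): ('<',),
-- }
--
--
-- def max_energized_tiles(data: List[str]) -> int:
--     # One global dataflow computation shared by every entry point: for each beam
--     # state (view, x, y) compute the bitmask of positions its beam energizes, as
--     # the least fixed point of  P[s] = ownbit(s) | union of P over successors,
--     # by in-place (Gauss-Seidel) sweeps in per-direction topological order;
--     # each entry point then costs a single dictionary lookup and popcount.
--     rows, cols = len(data), len(data[0])
--
--     def succ(s):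
--         v, x, y = s
--         dx, dy = NEXT_DIFF[v]
--         nx, ny = x + dx, y + dy
--         if 0 <= nx < rows and 0 <= ny < cols:
--             return [(nv, nx, ny)
--                     for nv in ROTATIONS.get((v, data[nx][ny]), (v,))]
--         return []
--
--     # sweep order: each direction's states in the direction the beam travels,
--     # last cell first, so a straight run is finished in a single sweep
--     order = ([('v', x, y) for x in reversed(range(rows)) for y in range(cols)]
--              + [('^', x, y) for x in range(rows) for y in range(cols)]
--              + [('>', x, y) for x in range(rows) for y in reversed(range(cols))]
--              + [('<', x, y) for x in range(rows) for y in range(cols)])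
--
--     P = {s: 1 << (s[1] * cols + s[2]) for s in order}
--     while True:
--         changed = False
--         for s in order:
--             m = 1 << (s[1] * cols + s[2])
--             for u in succ(s):
--                 m |= P[u]
--             if m != P[s]:
--                 P[s] = m
--                 changed = True
--         if not changed:
--             break
--
--     starts = []
--     for i in range(rows):
--         starts.append(('>', i, 0))
--         starts.append(('<', i, cols - 1))
--     for j in range(cols):
--         starts.append(('v', 0, j))
--         starts.append(('^', rows - 1, j))
--     return max((bin(P[s]).count('1') for s in starts), default=0)
-- ===== Notes on version B (the rewrite author's own statement) =====
-- stated objective: alternative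
-- what changed: A runs an independent BFS flood fill (dict position->set of directions, per-round beam lists) from each of the 2(N+M) entry points; B never traverses per start: it builds one global table mapping every beam state (direction, x, y) to the bitmask of positions its beam energizes, computed once as the least fixed point of P[s] = ownbit(s) | union of P over successors by in-place Gauss-Seidel sweeps in per-direction topological order, after which each entry point costs a single lookup and popcount.
import Mathlib
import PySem

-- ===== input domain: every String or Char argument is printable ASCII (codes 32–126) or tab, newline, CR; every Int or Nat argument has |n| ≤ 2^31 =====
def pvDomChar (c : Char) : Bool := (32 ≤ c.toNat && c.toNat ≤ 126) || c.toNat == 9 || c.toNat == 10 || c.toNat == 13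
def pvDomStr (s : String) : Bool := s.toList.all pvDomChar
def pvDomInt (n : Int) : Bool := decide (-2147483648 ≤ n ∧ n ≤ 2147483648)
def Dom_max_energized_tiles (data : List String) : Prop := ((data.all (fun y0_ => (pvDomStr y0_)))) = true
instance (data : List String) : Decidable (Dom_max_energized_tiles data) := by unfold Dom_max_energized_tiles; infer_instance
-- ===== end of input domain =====

-- A's per-entry-point layered BFS (dict position→set-of-directions, per-round beam lists, two
-- running-max loops) vs B's single global dataflow fixpoint: one table of energized-position
-- bitmasks per beam state, computed once by in-place sweeps and shared by every entry point;
-- equal return value proved on Pre_ (nonempty grid, every row at least as long as row 0 — exactly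
-- where A returns).


-- ===== shared module context (Python module constants NEXT_DIFF / ROTATIONS and the
-- beam-advance computation both Pythons perform character for character) =====

-- NEXT_DIFF[view]  (total: views are always one of the four arrows)
def nextDiff (v : Char) : Int × Int :=
  match v with
  | '>' => (0, 1)
  | '<' => (0, -1)
  | 'v' => (1, 0)
  | '^' => (-1, 0)
  | _ => (0, 0)

-- ROTATIONS.get((v, s), (v,))
def rotGet (v s : Char) : List Char :=
  match v, s with
  | '>', '|' => ['^', 'v']
  | '<', '|' => ['^', 'v']
  | 'v', '-' => ['<', '>']
  | '^', '-' => ['<', '>']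
  | '>', '/' => ['^']
  | '<', '/' => ['v']
  | 'v', '/' => ['<']
  | '^', '/' => ['>']
  | '>', '\\' => ['v']
  | '<', '\\' => ['^']
  | 'v', '\\' => ['>']
  | '^', '\\' => ['<']
  | _, _ => [v]

def pvRows (data : List String) : Nat := data.length

-- len(data[0]); data is nonempty under Pre_
def pvCols (data : List String) : Int := PySem.Str.len (data.headD "")

-- data[x][y]; both indices are in range whenever evaluated, under Pre_
def pvSym (data : List String) (x y : Int) : Char :=
  (PySem.Str.pyGet? ((PySem.List.pyGet? data x).getD "") y).getD ' '

-- the shared inner step: from state (view,(x,y)) compute (x,y)+NEXT_DIFF[view], bounds-check it,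
-- and rotate the view by the symbol there (both Pythons run exactly this code in their loops)
def pvStep (data : List String) (s : Char × Int × Int) : List (Char × Int × Int) :=
  if 0 ≤ s.2.1 + (nextDiff s.1).1 ∧ s.2.1 + (nextDiff s.1).1 < (pvRows data : Int) ∧
     0 ≤ s.2.2 + (nextDiff s.1).2 ∧ s.2.2 + (nextDiff s.1).2 < pvCols data then
    (rotGet s.1 (pvSym data (s.2.1 + (nextDiff s.1).1) (s.2.2 + (nextDiff s.1).2))).map
      (fun nv => (nv, s.2.1 + (nextDiff s.1).1, s.2.2 + (nextDiff s.1).2))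
  else []

-- ===== PORT A =====

-- the body of A's `for view, (x, y) in beams:` loop: update the dict-of-sets, then append successors
def pvLayerA (data : List String)
    (acc : PySem.Dict (Int × Int) (PySem.Set Char) × List (Char × Int × Int))
    (b : Char × Int × Int) :
    PySem.Dict (Int × Int) (PySem.Set Char) × List (Char × Int × Int) :=
  match acc.1.get? (b.2.1, b.2.2) with
  | some st =>
    if b.1 ∈ st then acc
    else (acc.1.insert (b.2.1, b.2.2) (PySem.Set.add st b.1), acc.2 ++ pvStep data b)
  | none => (acc.1.insert (b.2.1, b.2.2) (PySem.Set.ofList [b.1]), acc.2 ++ pvStep data b)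

-- A's `while len(beams):` loop; fuel recursion (the fuel passed below is provably sufficient)
def pvLoopA (data : List String) :
    Nat → PySem.Dict (Int × Int) (PySem.Set Char) → List (Char × Int × Int) →
    PySem.Dict (Int × Int) (PySem.Set Char)
  | 0, vis, _ => vis
  | fuel + 1, vis, beams =>
    match beams with
    | [] => vis
    | _ :: _ =>
      let r := beams.foldl (pvLayerA data) (vis, [])
      pvLoopA data fuel r.1 r.2

-- energized_tiles(data, start_view, start_pos)
def energized_tiles (data : List String) (view : Char) (pos : Int × Int) : Int :=
  let symbol := pvSym data pos.1 pos.2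
  let beams := (rotGet view symbol).map (fun _ => (view, pos.1, pos.2))
  let vis := pvLoopA data (2 * (4 * pvRows data * (pvCols data).toNat) + 2) PySem.Dict.empty beams
  (vis.size : Int)

def max_energized_tiles (data : List String) : Int :=
  let r1 := (PySem.List.pyRange 0 (pvRows data : Int) 1).foldl
    (fun result i =>
      max (max result (energized_tiles data '>' (i, 0)))
          (energized_tiles data '<' (i, (pvCols data : Int) - 1))) 0
  (PySem.List.pyRange 0 (pvCols data : Int) 1).foldl
    (fun result j =>
      max (max result (energized_tiles data 'v' (0, j)))
          (energized_tiles data '^' ((pvRows data : Int) - 1, j))) r1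

-- ===== PORT B =====

-- index of position (x, y) in B's bitmasks: x*cols + y (x, y are in range on every state B stores)
def pvIdxP (data : List String) (q : Int × Int) : Nat :=
  q.1.toNat * (pvCols data).toNat + q.2.toNat

-- 1 << (x*cols + y), the state's own-position bit
def pvBit (data : List String) (s : Char × Int × Int) : Nat :=
  2 ^ pvIdxP data s.2

-- B's sweep order: each direction's states listed the way that beam travels, last cell first
def pvOrder (data : List String) : List (Char × Int × Int) :=
  ((List.range (pvRows data)).reverse.flatMap (fun (x : Nat) =>
      (List.range (pvCols data).toNat).map (fun (y : Nat) =>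
        (('v', (x : Int), (y : Int)) : Char × Int × Int)))) ++
  ((List.range (pvRows data)).flatMap (fun (x : Nat) =>
      (List.range (pvCols data).toNat).map (fun (y : Nat) =>
        (('^', (x : Int), (y : Int)) : Char × Int × Int)))) ++
  ((List.range (pvRows data)).flatMap (fun (x : Nat) =>
      (List.range (pvCols data).toNat).reverse.map (fun (y : Nat) =>
        (('>', (x : Int), (y : Int)) : Char × Int × Int)))) ++
  ((List.range (pvRows data)).flatMap (fun (x : Nat) =>
      (List.range (pvCols data).toNat).map (fun (y : Nat) =>
        (('<', (x : Int), (y : Int)) : Char × Int × Int))))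

-- m = bit | union of P over successors (the inner `for u in succ(s): m |= P[u]` loop; every
-- successor is a stored key, so the 0 default of getD is never taken)
def pvFval (data : List String) (P : PySem.Dict (Char × Int × Int) Nat)
    (s : Char × Int × Int) : Nat :=
  (pvStep data s).foldl (fun m u => m ||| P.getD u 0) (pvBit data s)

-- one in-place sweep (B's `for s in order:` loop), with its changed flag
def pvSweep (data : List String) (P : PySem.Dict (Char × Int × Int) Nat) :
    PySem.Dict (Char × Int × Int) Nat × Bool :=
  (pvOrder data).foldl
    (fun acc s =>
      if pvFval data acc.1 s = acc.1.getD s 0 then acc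
      else (acc.1.insert s (pvFval data acc.1 s), true))
    (P, false)

-- P = {s: bit(s) for s in order}
def pvInitB (data : List String) : PySem.Dict (Char × Int × Int) Nat :=
  (pvOrder data).foldl (fun d s => d.insert s (pvBit data s)) PySem.Dict.empty

-- B's `while True:` loop; fuel recursion (the fuel passed below is provably sufficient)
def pvIterB (data : List String) :
    Nat → PySem.Dict (Char × Int × Int) Nat → PySem.Dict (Char × Int × Int) Nat
  | 0, P => P
  | fuel + 1, P =>
    let r := pvSweep data P
    if r.2 then pvIterB data fuel r.1 else P

def max_energized_tiles_alt (data : List String) : Int :=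
  let P := pvIterB data
    (4 * pvRows data * (pvCols data).toNat * (pvRows data * (pvCols data).toNat) + 1)
    (pvInitB data)
  let starts :=
    (PySem.List.pyRange 0 (pvRows data : Int) 1).flatMap
      (fun i => [('>', i, (0 : Int)), ('<', i, (pvCols data : Int) - 1)]) ++
    (PySem.List.pyRange 0 (pvCols data : Int) 1).flatMap
      (fun j => [('v', (0 : Int), j), ('^', (pvRows data : Int) - 1, j)])
  PySem.List.maxD
    (starts.map (fun s => (PySem.Int.bitCount ((P.getD s 0 : Nat) : Int) : Int)))
    (fun x => x) 0

-- ===== PRECONDITION & SPEC =====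

-- Pre_ excludes exactly the inputs where A raises (IndexError): the empty grid, an empty first
-- row, and grids with a row shorter than row 0.
def Pre_max_energized_tiles (data : List String) : Prop :=
  data ≠ [] ∧ 0 < pvCols data ∧ ∀ row ∈ data, pvCols data ≤ PySem.Str.len row

instance (data : List String) : Decidable (Pre_max_energized_tiles data) := by
  unfold Pre_max_energized_tiles; infer_instance

def pvWitness_max_energized_tiles : List String := ["./", "\\."]

def Spec_max_energized_tiles (data : List String) (out : Int) : Prop := out = max_energized_tiles_alt data
instance (data : List String) (out : Int) : Decidable (Spec_max_energized_tiles data out) := by unfold Spec_max_energized_tiles; infer_instance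

-- ===== CLAIM (what is proved, stated in full; the proofs are below) =====
def Claim_equal_max_energized_tiles : Prop := ∀ (data : List String), Dom_max_energized_tiles data → Pre_max_energized_tiles data → Spec_max_energized_tiles data (max_energized_tiles data)

-- ===== LEMMAS AND PROOFS =====

-- ---- proof-layer vocabulary: beam states, validity, the reachability relation ----

def pvViews : List Char := ['>', '<', 'v', '^']

def pvValid (data : List String) (s : Char × Int × Int) : Prop :=
  s.1 ∈ pvViews ∧ 0 ≤ s.2.1 ∧ s.2.1 < (pvRows data : Int) ∧ 0 ≤ s.2.2 ∧ s.2.2 < pvCols data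

def pvAll (data : List String) : List (Char × Int × Int) :=
  pvViews.flatMap (fun v => (List.range (pvRows data)).flatMap (fun (x : Nat) =>
    (List.range (pvCols data).toNat).map (fun (y : Nat) =>
      ((v, (x : Int), (y : Int)) : Char × Int × Int))))

def pvReach (data : List String) (a b : Char × Int × Int) : Prop :=
  Relation.ReflTransGen (fun u t => t ∈ pvStep data u) a b

-- membership of a state in A's dict-of-sets, as a Bool
def pvMemA (s : Char × Int × Int) (d : PySem.Dict (Int × Int) (PySem.Set Char)) : Bool :=
  match d.get? (s.2.1, s.2.2) with
  | some st => decide (s.1 ∈ st)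
  | none => false

def pvMissA (data : List String) (d : PySem.Dict (Int × Int) (PySem.Set Char)) : Nat :=
  ((pvAll data).filter (fun s => !(pvMemA s d))).length

-- A's dict is well-formed: keys are nodup and a key is present iff some direction is stored at it
def pvGood (d : PySem.Dict (Int × Int) (PySem.Set Char)) : Prop :=
  d.keys.Nodup ∧ ∀ p : Int × Int, p ∈ d.keys ↔ ∃ v, pvMemA (v, p.1, p.2) d = true

-- ---- basic facts about the shared step ----

theorem rotGet_ne_nil (v s : Char) : rotGet v s ≠ [] := by
  unfold rotGet; split <;> simp

theorem rotGet_mem_views (v s u : Char) (hv : v ∈ pvViews) (hu : u ∈ rotGet v s) : u ∈ pvViews := by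
  unfold rotGet at hu
  split at hu <;> simp_all [pvViews] <;> tauto

theorem pvStep_valid (data : List String) {s t : Char × Int × Int}
    (hs : s.1 ∈ pvViews) (ht : t ∈ pvStep data s) : pvValid data t := by
  unfold pvStep at ht
  split at ht
  · rename_i h
    simp only [List.mem_map] at ht
    obtain ⟨nv, hnv, rfl⟩ := ht
    exact ⟨rotGet_mem_views _ _ _ hs hnv, h.1, h.2.1, h.2.2.1, h.2.2.2⟩
  · simp at ht

theorem pvReach_valid (data : List String) {s t : Char × Int × Int}
    (hr : pvReach data s t) (hs : pvValid data s) : pvValid data t := by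
  unfold pvReach at hr
  induction hr with
  | refl => exact hs
  | tail _ hstep ih => exact pvStep_valid data ih.1 hstep

theorem mem_dirBlock (ch : Char) (xs ys : List Nat) (v : Char) (x y : Int) :
    ((v, x, y) ∈ xs.flatMap (fun (a : Nat) => ys.map (fun (b : Nat) =>
        ((ch, (a : Int), (b : Int)) : Char × Int × Int)))) ↔
      (v = ch ∧ (∃ a ∈ xs, (a : Int) = x) ∧ (∃ b ∈ ys, (b : Int) = y)) := by
  simp only [List.mem_flatMap, List.mem_map, Prod.mk.injEq]
  constructor
  · rintro ⟨a, ha, b, hb, h1, h2, h3⟩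
    exact ⟨h1.symm, ⟨a, ha, h2⟩, ⟨b, hb, h3⟩⟩
  · rintro ⟨rfl, ⟨a, ha, h2⟩, ⟨b, hb, h3⟩⟩
    exact ⟨a, ha, b, hb, rfl, h2, h3⟩

theorem mem_pvAll_iff (data : List String) (s : Char × Int × Int) :
    s ∈ pvAll data ↔ pvValid data s := by
  obtain ⟨v, x, y⟩ := s
  constructor
  · intro h
    unfold pvAll at h
    rw [List.mem_flatMap] at h
    obtain ⟨v', hv', hmem⟩ := h
    rw [mem_dirBlock] at hmem
    obtain ⟨rfl, ⟨a, ha, rfl⟩, ⟨b, hb, rfl⟩⟩ := hmem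
    rw [List.mem_range] at ha hb
    refine ⟨hv', ?_, ?_, ?_, ?_⟩ <;> simp <;> omega
  · rintro ⟨hv, h1, h2, h3, h4⟩
    have h1' : 0 ≤ x := h1
    have h2' : x < (pvRows data : Int) := h2
    have h3' : 0 ≤ y := h3
    have h4' : y < pvCols data := h4
    clear h1 h2 h3 h4
    unfold pvAll
    rw [List.mem_flatMap]
    exact ⟨v, hv, (mem_dirBlock v _ _ v x y).mpr
      ⟨rfl, ⟨x.toNat, by rw [List.mem_range]; omega, by omega⟩,
        ⟨y.toNat, by rw [List.mem_range]; omega, by omega⟩⟩⟩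

theorem length_pvAll (data : List String) :
    (pvAll data).length = 4 * pvRows data * (pvCols data).toNat := by
  simp [pvAll, List.length_flatMap, List.map_const', List.sum_replicate, pvViews]
  ring

theorem pvMissA_le (data : List String) (d : PySem.Dict (Int × Int) (PySem.Set Char)) :
    pvMissA data d ≤ 4 * pvRows data * (pvCols data).toNat :=
  (length_pvAll data) ▸ List.length_filter_le _ _

-- a monotone strengthening of the visited predicate, with one genuinely new member of l,
-- strictly shrinks the filtered complement (specific glue for A's fuel argument)
theorem pv_filter_decrease {α : Type} (l : List α) (p q : α → Bool)
    (hmono : ∀ a, p a = true → q a = true) (a₀ : α) (ha : a₀ ∈ l)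
    (hp : p a₀ = false) (hq : q a₀ = true) :
    (l.filter (fun a => !q a)).length < (l.filter (fun a => !p a)).length := by
  have hmle : ∀ (t' : List α),
      (t'.filter (fun a => !q a)).length ≤ (t'.filter (fun a => !p a)).length := by
    intro t'
    induction t' with
    | nil => simp
    | cons b t'' ih' =>
      by_cases hpb : p b = true
      · simp [hpb, hmono b hpb, ih']
      · simp only [Bool.not_eq_true] at hpb
        by_cases hqb : q b = true <;> simp [hpb, hqb] <;> omega
  induction l with
  | nil => simp at ha
  | cons a t ih =>
    rcases List.mem_cons.mp ha with rfl | hat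
    · have := hmle t
      simp [hp, hq]
      omega
    · have := ih hat
      by_cases hpb : p a = true
      · simp [hpb, hmono a hpb, this]
      · simp only [Bool.not_eq_true] at hpb
        by_cases hqb : q a = true <;> simp [hpb, hqb] <;> omega

-- ---- A's dict updates, seen through pvMemA ----

theorem pvMemA_empty (s : Char × Int × Int) : pvMemA s PySem.Dict.empty = false := by
  simp [pvMemA, PySem.Dict.get?_empty]

theorem pvMemA_insert_some {d : PySem.Dict (Int × Int) (PySem.Set Char)}
    {b : Char × Int × Int} {st : PySem.Set Char}
    (hg : d.get? (b.2.1, b.2.2) = some st) (s : Char × Int × Int) :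
    pvMemA s (d.insert (b.2.1, b.2.2) (PySem.Set.add st b.1)) = true ↔
      pvMemA s d = true ∨ s = b := by
  unfold pvMemA
  by_cases hp : (s.2.1, s.2.2) = (b.2.1, b.2.2)
  · rw [hp, PySem.Dict.get?_insert_self, hg]
    have : s = b ↔ s.1 = b.1 := by
      constructor
      · intro h; rw [h]
      · intro h
        obtain ⟨s1, s2, s3⟩ := s; obtain ⟨b1, b2, b3⟩ := b
        simp only [Prod.mk.injEq] at hp ⊢
        exact ⟨h, hp.1, hp.2⟩
    simp [PySem.Set.mem_add, this]
  · rw [PySem.Dict.get?_insert_of_ne _ _ hp]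
    have : ¬ s = b := by
      intro h; exact hp (by rw [h])
    simp [this]

theorem pvMemA_insert_none {d : PySem.Dict (Int × Int) (PySem.Set Char)}
    {b : Char × Int × Int}
    (hg : d.get? (b.2.1, b.2.2) = none) (s : Char × Int × Int) :
    pvMemA s (d.insert (b.2.1, b.2.2) (PySem.Set.ofList [b.1])) = true ↔
      pvMemA s d = true ∨ s = b := by
  unfold pvMemA
  by_cases hp : (s.2.1, s.2.2) = (b.2.1, b.2.2)
  · rw [hp, PySem.Dict.get?_insert_self]
    have heq : s = b ↔ s.1 = b.1 := by
      constructor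
      · intro h; rw [h]
      · intro h
        obtain ⟨s1, s2, s3⟩ := s; obtain ⟨b1, b2, b3⟩ := b
        simp only [Prod.mk.injEq] at hp ⊢
        exact ⟨h, hp.1, hp.2⟩
    have hg' : d.get? b.2 = none := hg
    simp [PySem.Set.mem_ofList, heq, hg']
  · rw [PySem.Dict.get?_insert_of_ne _ _ hp]
    have : ¬ s = b := by
      intro h; exact hp (by rw [h])
    simp [this]

-- ---- characterization of one round of A (the foldl over the current beam list) ----

theorem pvFoldA_char (data : List String) :
    ∀ (beams : List (Char × Int × Int)) (d : PySem.Dict (Int × Int) (PySem.Set Char))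
      (nb : List (Char × Int × Int)),
      (∀ s, pvMemA s (beams.foldl (pvLayerA data) (d, nb)).1 = true ↔
        (pvMemA s d = true ∨ s ∈ beams)) ∧
      (∀ t, t ∈ (beams.foldl (pvLayerA data) (d, nb)).2 ↔
        (t ∈ nb ∨ ∃ b ∈ beams, pvMemA b d = false ∧ t ∈ pvStep data b)) := by
  intro beams
  induction beams with
  | nil => intro d nb; constructor <;> intro s <;> simp
  | cons b bs ih =>
    intro d nb
    simp only [List.foldl_cons]
    cases hg : d.get? (b.2.1, b.2.2) with
    | some st =>
      by_cases hm : b.1 ∈ st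
      · have hlay : pvLayerA data (d, nb) b = (d, nb) := by simp [pvLayerA, hg, hm]
        have hmemb : pvMemA b d = true := by simp [pvMemA, hg, hm]
        rw [hlay]
        obtain ⟨ih1, ih2⟩ := ih d nb
        refine ⟨fun s => ?_, fun t => ?_⟩
        · rw [ih1]
          simp only [List.mem_cons]
          constructor
          · rintro (h | h)
            · exact Or.inl h
            · exact Or.inr (Or.inr h)
          · rintro (h | rfl | h)
            · exact Or.inl h
            · exact Or.inl hmemb
            · exact Or.inr h
        · rw [ih2]
          simp only [List.mem_cons]
          constructor
          · rintro (h | ⟨b', hb', hf, ht⟩)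
            · exact Or.inl h
            · exact Or.inr ⟨b', Or.inr hb', hf, ht⟩
          · rintro (h | ⟨b', hb' | hb', hf, ht⟩)
            · exact Or.inl h
            · rw [hb'] at hf; rw [hmemb] at hf; cases hf
            · exact Or.inr ⟨b', hb', hf, ht⟩
      · have hlay : pvLayerA data (d, nb) b =
            (d.insert (b.2.1, b.2.2) (PySem.Set.add st b.1), nb ++ pvStep data b) := by
          simp [pvLayerA, hg, hm]
        have hmemb : pvMemA b d = false := by simp [pvMemA, hg, hm]
        have hins := pvMemA_insert_some hg
        rw [hlay]
        obtain ⟨ih1, ih2⟩ := ih (d.insert (b.2.1, b.2.2) (PySem.Set.add st b.1))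
          (nb ++ pvStep data b)
        refine ⟨fun s => ?_, fun t => ?_⟩
        · rw [ih1, hins s]
          simp only [List.mem_cons]
          tauto
        · rw [ih2]
          simp only [List.mem_cons, List.mem_append]
          constructor
          · rintro ((h | h) | ⟨b', hb', hf, ht⟩)
            · exact Or.inl h
            · exact Or.inr ⟨b, Or.inl rfl, hmemb, h⟩
            · have hf' : pvMemA b' d = false := by
                rcases Bool.eq_false_or_eq_true (pvMemA b' d) with h' | h'
                swap
                · exact h'
                · exfalso
                  have : pvMemA b' (d.insert (b.2.1, b.2.2) (PySem.Set.add st b.1)) = true :=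
                    (hins b').mpr (Or.inl h')
                  rw [this] at hf; cases hf
              exact Or.inr ⟨b', Or.inr hb', hf', ht⟩
          · rintro (h | ⟨b', hb' | hb', hf, ht⟩)
            · exact Or.inl (Or.inl h)
            · rw [hb'] at ht; exact Or.inl (Or.inr ht)
            · by_cases hbb : b' = b
              · rw [hbb] at ht; exact Or.inl (Or.inr ht)
              · refine Or.inr ⟨b', hb', ?_, ht⟩
                rcases Bool.eq_false_or_eq_true
                    (pvMemA b' (d.insert (b.2.1, b.2.2) (PySem.Set.add st b.1))) with h' | h'
                swap
                · exact h'
                · rcases (hins b').mp h' with h'' | h''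
                  · rw [h''] at hf; cases hf
                  · exact absurd h'' hbb
    | none =>
      have hlay : pvLayerA data (d, nb) b =
          (d.insert (b.2.1, b.2.2) (PySem.Set.ofList [b.1]), nb ++ pvStep data b) := by
        simp [pvLayerA, hg]
      have hmemb : pvMemA b d = false := by simp [pvMemA, hg]
      have hins := pvMemA_insert_none hg
      rw [hlay]
      obtain ⟨ih1, ih2⟩ := ih (d.insert (b.2.1, b.2.2) (PySem.Set.ofList [b.1]))
        (nb ++ pvStep data b)
      refine ⟨fun s => ?_, fun t => ?_⟩
      · rw [ih1, hins s]
        simp only [List.mem_cons]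
        tauto
      · rw [ih2]
        simp only [List.mem_cons, List.mem_append]
        constructor
        · rintro ((h | h) | ⟨b', hb', hf, ht⟩)
          · exact Or.inl h
          · exact Or.inr ⟨b, Or.inl rfl, hmemb, h⟩
          · have hf' : pvMemA b' d = false := by
              rcases Bool.eq_false_or_eq_true (pvMemA b' d) with h' | h'
              swap
              · exact h'
              · exfalso
                have : pvMemA b' (d.insert (b.2.1, b.2.2) (PySem.Set.ofList [b.1])) = true :=
                  (hins b').mpr (Or.inl h')
                rw [this] at hf; cases hf
            exact Or.inr ⟨b', Or.inr hb', hf', ht⟩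
        · rintro (h | ⟨b', hb' | hb', hf, ht⟩)
          · exact Or.inl (Or.inl h)
          · rw [hb'] at ht; exact Or.inl (Or.inr ht)
          · by_cases hbb : b' = b
            · rw [hbb] at ht; exact Or.inl (Or.inr ht)
            · refine Or.inr ⟨b', hb', ?_, ht⟩
              rcases Bool.eq_false_or_eq_true
                  (pvMemA b' (d.insert (b.2.1, b.2.2) (PySem.Set.ofList [b.1]))) with h' | h'
              swap
              · exact h'
              · rcases (hins b').mp h' with h'' | h''
                · rw [h''] at hf; cases hf
                · exact absurd h'' hbb

-- one round preserves well-formedness of the dict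
theorem pvFoldA_good (data : List String) :
    ∀ (beams : List (Char × Int × Int)) (d : PySem.Dict (Int × Int) (PySem.Set Char))
      (nb : List (Char × Int × Int)),
      pvGood d → pvGood (beams.foldl (pvLayerA data) (d, nb)).1 := by
  intro beams
  induction beams with
  | nil => intro d nb h; exact h
  | cons b bs ih =>
    intro d nb hgood
    simp only [List.foldl_cons]
    cases hg : d.get? (b.2.1, b.2.2) with
    | some st =>
      by_cases hm : b.1 ∈ st
      · rw [show pvLayerA data (d, nb) b = (d, nb) by simp [pvLayerA, hg, hm]]
        exact ih d nb hgood
      · rw [show pvLayerA data (d, nb) b =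
            (d.insert (b.2.1, b.2.2) (PySem.Set.add st b.1), nb ++ pvStep data b) by
          simp [pvLayerA, hg, hm]]
        apply ih
        obtain ⟨hnd, hch⟩ := hgood
        have hcont : d.contains (b.2.1, b.2.2) = true := by
          rw [PySem.Dict.contains_eq_isSome_get?, hg]; rfl
        refine ⟨PySem.Dict.nodup_keys_insert _ _ _ hnd, fun p => ?_⟩
        rw [PySem.Dict.keys_insert_of_contains _ _ hcont]
        constructor
        · intro hp
          obtain ⟨v, hv⟩ := (hch p).mp hp
          exact ⟨v, (pvMemA_insert_some hg _).mpr (Or.inl hv)⟩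
        · rintro ⟨v, hv⟩
          rcases (pvMemA_insert_some hg _).mp hv with h | h
          · exact (hch p).mpr ⟨v, h⟩
          · have hp : p = (b.2.1, b.2.2) := by rw [← h]
            rw [hp]
            by_contra hc
            rw [← PySem.Dict.get?_eq_none_iff_not_mem_keys] at hc
            rw [hc] at hg; cases hg
    | none =>
      rw [show pvLayerA data (d, nb) b =
          (d.insert (b.2.1, b.2.2) (PySem.Set.ofList [b.1]), nb ++ pvStep data b) by
        simp [pvLayerA, hg]]
      apply ih
      obtain ⟨hnd, hch⟩ := hgood
      have hcont : d.contains (b.2.1, b.2.2) = false := by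
        rw [PySem.Dict.contains_eq_isSome_get?, hg]; rfl
      refine ⟨PySem.Dict.nodup_keys_insert _ _ _ hnd, fun p => ?_⟩
      rw [PySem.Dict.keys_insert_of_not_contains _ _ hcont]
      simp only [List.mem_append, List.mem_singleton]
      constructor
      · rintro (hp | rfl)
        · obtain ⟨v, hv⟩ := (hch p).mp hp
          exact ⟨v, (pvMemA_insert_none hg _).mpr (Or.inl hv)⟩
        · exact ⟨b.1, (pvMemA_insert_none hg _).mpr (Or.inr rfl)⟩
      · rintro ⟨v, hv⟩
        rcases (pvMemA_insert_none hg _).mp hv with h | h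
        · exact Or.inl ((hch p).mpr ⟨v, h⟩)
        · right; rw [← h]

theorem pvLoopA_nil (data : List String) (fuel : Nat)
    (d : PySem.Dict (Int × Int) (PySem.Set Char)) :
    pvLoopA data fuel d [] = d := by
  cases fuel <;> rfl

-- absorption: anything reachable from the old dict or the old beams is in the new dict
-- or reachable from the new beam list
theorem pvReachA_absorb (data : List String)
    {d d' : PySem.Dict (Int × Int) (PySem.Set Char)} {beams nb : List (Char × Int × Int)}
    (hclosed : ∀ s, pvMemA s d = true → ∀ t ∈ pvStep data s, pvMemA t d = true ∨ t ∈ beams)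
    (h1 : ∀ s, pvMemA s d' = true ↔ (pvMemA s d = true ∨ s ∈ beams))
    (h2 : ∀ b ∈ beams, pvMemA b d = true ∨ ∀ t ∈ pvStep data b, t ∈ nb)
    {u s : Char × Int × Int} (hr : pvReach data u s)
    (hu : pvMemA u d = true ∨ u ∈ beams) :
    pvMemA s d' = true ∨ ∃ t ∈ nb, pvReach data t s := by
  unfold pvReach at hr
  revert hu
  induction hr using Relation.ReflTransGen.head_induction_on with
  | refl => intro hu; exact Or.inl ((h1 s).mpr hu)
  | head hstep htail ihc =>
    intro hu
    rename_i cmid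
    rcases hu with hmem | hbeam
    · exact ihc (hclosed _ hmem _ hstep)
    · rcases h2 _ hbeam with hmem | hsub
      · exact ihc (hclosed _ hmem _ hstep)
      · exact Or.inr ⟨cmid, hsub _ hstep, htail⟩

-- A's while-loop computes exactly the states reachable from the initial beams
theorem pvLoopA_char (data : List String) :
    ∀ (fuel : Nat) (d : PySem.Dict (Int × Int) (PySem.Set Char))
      (beams : List (Char × Int × Int)),
      (∀ s, pvMemA s d = true → pvValid data s) →
      (∀ b ∈ beams, pvValid data b) →
      (∀ s, pvMemA s d = true → ∀ t ∈ pvStep data s, pvMemA t d = true ∨ t ∈ beams) →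
      2 * pvMissA data d + 2 ≤ fuel →
      ∀ s, pvMemA s (pvLoopA data fuel d beams) = true ↔
        (pvMemA s d = true ∨ ∃ b ∈ beams, pvReach data b s) := by
  intro fuel
  induction fuel with
  | zero => intro d beams _ _ _ hfuel; omega
  | succ f ih =>
    intro d beams hvd hvb hcl hfuel s
    cases beams with
    | nil => simp [pvLoopA_nil]
    | cons b bs =>
      have hfold := pvFoldA_char data (b :: bs) d []
      obtain ⟨h1, h2⟩ := hfold
      simp only [List.not_mem_nil, false_or] at h2
      have h2b : ∀ b' ∈ b :: bs, pvMemA b' d = true ∨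
          ∀ t ∈ pvStep data b', t ∈ ((b :: bs).foldl (pvLayerA data) (d, [])).2 := by
        intro b' hb'
        rcases Bool.eq_false_or_eq_true (pvMemA b' d) with htrue | hfalse
        · exact Or.inl htrue
        · exact Or.inr (fun t ht => (h2 t).mpr ⟨b', hb', hfalse, ht⟩)
      have hgoal : pvLoopA data (f + 1) d (b :: bs) =
          pvLoopA data f ((b :: bs).foldl (pvLayerA data) (d, [])).1
            ((b :: bs).foldl (pvLayerA data) (d, [])).2 := rfl
      rw [hgoal]
      set d' := ((b :: bs).foldl (pvLayerA data) (d, [])).1 with hd'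
      set nb := ((b :: bs).foldl (pvLayerA data) (d, [])).2 with hnb
      by_cases hempty : nb = []
      · rw [hempty, pvLoopA_nil]
        constructor
        · intro hmem
          rcases (h1 s).mp hmem with h | h
          · exact Or.inl h
          · exact Or.inr ⟨s, h, Relation.ReflTransGen.refl⟩
        · rintro (h | ⟨b', hb', hr⟩)
          · exact (h1 s).mpr (Or.inl h)
          · rcases pvReachA_absorb data hcl h1 (hempty ▸ h2b) hr (Or.inr hb') with h | ⟨t, ht, _⟩
            · exact h
            · cases ht
      · have hvd' : ∀ s', pvMemA s' d' = true → pvValid data s' := by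
          intro s' hs'
          rcases (h1 s').mp hs' with h | h
          · exact hvd s' h
          · exact hvb s' h
        have hvnb : ∀ t ∈ nb, pvValid data t := by
          intro t ht
          obtain ⟨b', hb', _, hstep⟩ := (h2 t).mp ht
          exact pvStep_valid data (hvb b' hb').1 hstep
        have hcl' : ∀ s', pvMemA s' d' = true →
            ∀ t ∈ pvStep data s', pvMemA t d' = true ∨ t ∈ nb := by
          intro s' hs' t ht
          rcases (h1 s').mp hs' with h | h
          · rcases hcl s' h t ht with h' | h'
            · exact Or.inl ((h1 t).mpr (Or.inl h'))
            · exact Or.inl ((h1 t).mpr (Or.inr h'))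
          · rcases h2b s' h with h' | h'
            · rcases hcl s' h' t ht with h'' | h''
              · exact Or.inl ((h1 t).mpr (Or.inl h''))
              · exact Or.inl ((h1 t).mpr (Or.inr h''))
            · exact Or.inr (h' t ht)
        have hfuel' : 2 * pvMissA data d' + 2 ≤ f := by
          obtain ⟨t, ht⟩ := List.exists_mem_of_ne_nil _ hempty
          obtain ⟨b0, hb0, hb0f, _⟩ := (h2 t).mp ht
          have hb0t : pvMemA b0 d' = true := (h1 b0).mpr (Or.inr hb0)
          have hall : b0 ∈ pvAll data := (mem_pvAll_iff data b0).mpr (hvb b0 hb0)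
          have hdec : pvMissA data d' < pvMissA data d := by
            unfold pvMissA
            exact pv_filter_decrease (pvAll data) _ _
              (fun a ha => (h1 a).mpr (Or.inl ha)) b0 hall hb0f hb0t
          omega
        have hih := ih d' nb hvd' hvnb hcl' hfuel'
        rw [hih s]
        constructor
        · rintro (h | ⟨t, ht, hr⟩)
          · rcases (h1 s).mp h with h' | h'
            · exact Or.inl h'
            · exact Or.inr ⟨s, h', Relation.ReflTransGen.refl⟩
          · obtain ⟨b', hb', _, hstep⟩ := (h2 t).mp ht
            exact Or.inr ⟨b', hb', Relation.ReflTransGen.head hstep hr⟩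
        · rintro (h | ⟨b', hb', hr⟩)
          · exact Or.inl ((h1 s).mpr (Or.inl h))
          · exact pvReachA_absorb data hcl h1 h2b hr (Or.inr hb')

theorem pvLoopA_good (data : List String) :
    ∀ (fuel : Nat) (d : PySem.Dict (Int × Int) (PySem.Set Char))
      (beams : List (Char × Int × Int)),
      pvGood d → pvGood (pvLoopA data fuel d beams) := by
  intro fuel
  induction fuel with
  | zero => intro d beams h; exact h
  | succ f ih =>
    intro d beams h
    cases beams with
    | nil => exact h
    | cons b bs => exact ih _ _ (pvFoldA_good data (b :: bs) d [] h)

-- ---- B side: bit-level vocabulary ----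

-- set-of-bits inclusion between masks
def pvBitSub (m n : Nat) : Prop := ∀ i, m.testBit i = true → n.testBit i = true

theorem pvBitSub_refl (m : Nat) : pvBitSub m m := fun _ h => h

theorem mem_pvOrder_iff (data : List String) (s : Char × Int × Int) :
    s ∈ pvOrder data ↔ pvValid data s := by
  obtain ⟨v, x, y⟩ := s
  unfold pvOrder
  rw [List.mem_append, List.mem_append, List.mem_append,
    mem_dirBlock, mem_dirBlock, mem_dirBlock, mem_dirBlock]
  constructor
  · intro h
    rcases h with ((⟨rfl, ⟨a, ha, rfl⟩, ⟨b, hb, rfl⟩⟩ | ⟨rfl, ⟨a, ha, rfl⟩, ⟨b, hb, rfl⟩⟩) |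
        ⟨rfl, ⟨a, ha, rfl⟩, ⟨b, hb, rfl⟩⟩) | ⟨rfl, ⟨a, ha, rfl⟩, ⟨b, hb, rfl⟩⟩ <;>
      simp only [List.mem_reverse, List.mem_range] at ha hb <;>
      refine ⟨by simp [pvViews], ?_, ?_, ?_, ?_⟩ <;> simp <;> omega
  · rintro ⟨hv, h1, h2, h3, h4⟩
    have h1' : 0 ≤ x := h1
    have h2' : x < (pvRows data : Int) := h2
    have h3' : 0 ≤ y := h3
    have h4' : y < pvCols data := h4
    clear h1 h2 h3 h4
    have hxm : x.toNat ∈ List.range (pvRows data) := by rw [List.mem_range]; omega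
    have hxm' : x.toNat ∈ (List.range (pvRows data)).reverse := by
      rw [List.mem_reverse]; exact hxm
    have hym : y.toNat ∈ List.range (pvCols data).toNat := by rw [List.mem_range]; omega
    have hym' : y.toNat ∈ (List.range (pvCols data).toNat).reverse := by
      rw [List.mem_reverse]; exact hym
    have hxx : ((x.toNat : Nat) : Int) = x := by omega
    have hyy : ((y.toNat : Nat) : Int) = y := by omega
    rcases (by simpa [pvViews] using hv : v = '>' ∨ v = '<' ∨ v = 'v' ∨ v = '^') with
      rfl | rfl | rfl | rfl
    · exact Or.inl (Or.inr ⟨rfl, ⟨x.toNat, hxm, hxx⟩, ⟨y.toNat, hym', hyy⟩⟩)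
    · exact Or.inr ⟨rfl, ⟨x.toNat, hxm, hxx⟩, ⟨y.toNat, hym, hyy⟩⟩
    · exact Or.inl (Or.inl (Or.inl ⟨rfl, ⟨x.toNat, hxm', hxx⟩, ⟨y.toNat, hym, hyy⟩⟩))
    · exact Or.inl (Or.inl (Or.inr ⟨rfl, ⟨x.toNat, hxm, hxx⟩, ⟨y.toNat, hym, hyy⟩⟩))

-- bits of a fold of unions
theorem testBit_foldl_or {α : Type} (l : List α) (g : α → Nat) (a : Nat) (i : Nat) :
    (l.foldl (fun m u => m ||| g u) a).testBit i = true ↔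
      a.testBit i = true ∨ ∃ u ∈ l, (g u).testBit i = true := by
  induction l generalizing a with
  | nil => simp
  | cons u t ih =>
    simp only [List.foldl_cons, ih, Nat.testBit_or, Bool.or_eq_true, List.mem_cons]
    constructor
    · rintro ((h | h) | ⟨w, hw, h⟩)
      · exact Or.inl h
      · exact Or.inr ⟨u, Or.inl rfl, h⟩
      · exact Or.inr ⟨w, Or.inr hw, h⟩
    · rintro (h | ⟨w, rfl | hw, h⟩)
      · exact Or.inl (Or.inl h)
      · exact Or.inl (Or.inr h)
      · exact Or.inr ⟨w, hw, h⟩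

theorem testBit_pvFval (data : List String) (P : PySem.Dict (Char × Int × Int) Nat)
    (s : Char × Int × Int) (i : Nat) :
    (pvFval data P s).testBit i = true ↔
      pvIdxP data s.2 = i ∨ ∃ u ∈ pvStep data s, (P.getD u 0).testBit i = true := by
  unfold pvFval pvBit
  rw [testBit_foldl_or]
  rw [Nat.testBit_two_pow]
  simp only [decide_eq_true_eq]

theorem pvFval_mono (data : List String) {P Q : PySem.Dict (Char × Int × Int) Nat}
    (s : Char × Int × Int)
    (h : ∀ u, pvBitSub (P.getD u 0) (Q.getD u 0)) :
    pvBitSub (pvFval data P s) (pvFval data Q s) := by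
  intro i hi
  rw [testBit_pvFval] at hi ⊢
  rcases hi with hi | ⟨u, hu, hi⟩
  · exact Or.inl hi
  · exact Or.inr ⟨u, hu, h u i hi⟩

-- the two B-side loop invariants
def pvPost (data : List String) (P : PySem.Dict (Char × Int × Int) Nat) : Prop :=
  ∀ s, pvValid data s → pvBitSub (P.getD s 0) (pvFval data P s)

def pvSound (data : List String) (P : PySem.Dict (Char × Int × Int) Nat) : Prop :=
  ∀ s, pvValid data s → ∀ i, (P.getD s 0).testBit i = true →
    ∃ t, pvReach data s t ∧ i = pvIdxP data t.2

-- pointwise growth of tables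
def pvTabLe (P Q : PySem.Dict (Char × Int × Int) Nat) : Prop :=
  ∀ s, pvBitSub (P.getD s 0) (Q.getD s 0)

-- a single in-place update at a valid state preserves everything and only grows the table
theorem pvUpdate_inv (data : List String) (P : PySem.Dict (Char × Int × Int) Nat)
    (s : Char × Int × Int) (hs : pvValid data s) (hpost : pvPost data P)
    (hsound : pvSound data P) :
    pvPost data (P.insert s (pvFval data P s)) ∧
    pvSound data (P.insert s (pvFval data P s)) ∧
    pvTabLe P (P.insert s (pvFval data P s)) := by
  set m := pvFval data P s with hm
  have hget : ∀ t, (P.insert s m).getD t 0 = if t = s then m else P.getD t 0 := by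
    intro t; rw [PySem.Dict.getD_insert]
  have htab : pvTabLe P (P.insert s m) := by
    intro t i hi
    rw [hget]
    split
    · rename_i h; subst h; exact hpost t hs i hi
    · exact hi
  refine ⟨?_, ?_, htab⟩
  · intro t ht i hi
    have hmono := pvFval_mono data t htab
    rw [hget] at hi
    split at hi
    · rename_i h; subst h
      exact hmono i hi
    · exact hmono i (hpost t ht i hi)
  · intro t ht i hi
    rw [hget] at hi
    split at hi
    · rename_i h; subst h
      rw [testBit_pvFval] at hi
      rcases hi with rfl | ⟨u, hu, hi⟩
      · exact ⟨t, Relation.ReflTransGen.refl, rfl⟩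
      · have hvu : pvValid data u := pvStep_valid data ht.1 hu
        obtain ⟨t', hr, rfl⟩ := hsound u hvu i hi
        exact ⟨t', Relation.ReflTransGen.head hu hr, rfl⟩
    · exact hsound t ht i hi

-- ---- popcount and masks as finite sets of bit indices ----

theorem pvIdxP_lt (data : List String) {q : Int × Int}
    (h1 : 0 ≤ q.1) (h2 : q.1 < (pvRows data : Int)) (h3 : 0 ≤ q.2) (h4 : q.2 < pvCols data) :
    pvIdxP data q < pvRows data * (pvCols data).toNat := by
  unfold pvIdxP
  have hx : q.1.toNat < pvRows data := by omega
  have hy : q.2.toNat < (pvCols data).toNat := by omega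
  calc q.1.toNat * (pvCols data).toNat + q.2.toNat
      < (q.1.toNat + 1) * (pvCols data).toNat := by
        rw [Nat.add_mul, Nat.one_mul]; omega
    _ ≤ pvRows data * (pvCols data).toNat := Nat.mul_le_mul_right _ (by omega)

theorem pvIdxP_inj (data : List String) {q1 q2 : Int × Int}
    (h1 : 0 ≤ q1.1 ∧ 0 ≤ q1.2 ∧ q1.2 < pvCols data)
    (h2 : 0 ≤ q2.1 ∧ 0 ≤ q2.2 ∧ q2.2 < pvCols data)
    (h : pvIdxP data q1 = pvIdxP data q2) : q1 = q2 := by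
  unfold pvIdxP at h
  have hy1 : q1.2.toNat < (pvCols data).toNat := by omega
  have hy2 : q2.2.toNat < (pvCols data).toNat := by omega
  have hx : q1.1.toNat = q2.1.toNat := by
    by_contra hne
    rcases Nat.lt_or_ge q1.1.toNat q2.1.toNat with hlt | hge
    · have hmul : (q1.1.toNat + 1) * (pvCols data).toNat ≤ q2.1.toNat * (pvCols data).toNat :=
        Nat.mul_le_mul_right _ (by omega)
      rw [Nat.add_mul, Nat.one_mul] at hmul
      omega
    · have hmul : (q2.1.toNat + 1) * (pvCols data).toNat ≤ q1.1.toNat * (pvCols data).toNat :=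
        Nat.mul_le_mul_right _ (by omega)
      rw [Nat.add_mul, Nat.one_mul] at hmul
      omega
  have hxc : q1.1.toNat * (pvCols data).toNat = q2.1.toNat * (pvCols data).toNat := by rw [hx]
  exact Prod.ext (by omega) (by omega)

-- a sound mask is bounded by 2^(rows*cols)
theorem pvMask_lt (data : List String) {m : Nat}
    (h : ∀ i, m.testBit i = true → i < pvRows data * (pvCols data).toNat) :
    m < 2 ^ (pvRows data * (pvCols data).toNat) := by
  apply Nat.lt_pow_two_of_testBit
  intro i hi
  by_contra hc
  simp only [Bool.not_eq_false] at hc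
  exact absurd (h i hc) (by omega)

-- popcount = cardinality of the set of bit indices below any bound
theorem pvPc_card : ∀ (B m : Nat), m < 2 ^ B →
    PySem.Int.bitCount (m : Int) =
      ((Finset.range B).filter (fun i => m.testBit i = true)).card := by
  intro B
  induction B with
  | zero =>
    intro m hm
    interval_cases m
    simp [PySem.Int.bitCount_zero]
  | succ b ih =>
    intro m hm
    rcases Nat.eq_zero_or_pos m with rfl | hpos
    · simp [PySem.Int.bitCount_zero, Nat.zero_testBit]
    · rw [PySem.Int.bitCount_natCast hpos, ih (m / 2) (by omega)]
      have hcard : ∀ (k : Nat) (p : Nat → Bool),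
          ((Finset.range k).filter (fun i => p i = true)).card =
            ∑ i ∈ Finset.range k, (if p i = true then 1 else 0) :=
        fun k p => Finset.card_filter _ _
      rw [hcard, hcard, Finset.sum_range_succ']
      have hb0 : m.testBit 0 = decide (m % 2 = 1) := Nat.testBit_zero m
      have hbs : ∀ i, m.testBit (i + 1) = (m / 2).testBit i := fun i => Nat.testBit_add_one m i
      simp only [hbs, hb0]
      have : (if decide (m % 2 = 1) = true then 1 else 0) = m % 2 := by
        rcases Nat.mod_two_eq_zero_or_one m with h | h <;> simp [h]
      omega

theorem pvPc_le {m n B : Nat} (hsub : pvBitSub m n) (hn : n < 2 ^ B) :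
    PySem.Int.bitCount (m : Int) ≤ PySem.Int.bitCount (n : Int) := by
  have hm : m < 2 ^ B := by
    apply Nat.lt_pow_two_of_testBit
    intro i hi
    by_contra hc
    simp only [Bool.not_eq_false] at hc
    have := Nat.ge_two_pow_of_testBit (hsub i hc)
    have : 2 ^ B ≤ 2 ^ i := Nat.pow_le_pow_right (by omega) hi
    omega
  rw [pvPc_card B m hm, pvPc_card B n hn]
  apply Finset.card_le_card
  intro i hi
  simp only [Finset.mem_filter, Finset.mem_range] at hi ⊢
  exact ⟨hi.1, hsub i hi.2⟩

theorem pvPc_lt {m n B : Nat} (hsub : pvBitSub m n) (hne : m ≠ n) (hn : n < 2 ^ B) :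
    PySem.Int.bitCount (m : Int) < PySem.Int.bitCount (n : Int) := by
  have hm : m < 2 ^ B := by
    apply Nat.lt_pow_two_of_testBit
    intro i hi
    by_contra hc
    simp only [Bool.not_eq_false] at hc
    have h1 := Nat.ge_two_pow_of_testBit (hsub i hc)
    have h2 : 2 ^ B ≤ 2 ^ i := Nat.pow_le_pow_right (by omega) hi
    omega
  obtain ⟨i, hin, him⟩ : ∃ i, n.testBit i = true ∧ m.testBit i = false := by
    by_contra hcon
    apply hne
    apply Nat.eq_of_testBit_eq
    intro j
    rcases Bool.eq_false_or_eq_true (n.testBit j) with hnj | hnj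
    · rcases Bool.eq_false_or_eq_true (m.testBit j) with hmj | hmj
      · rw [hmj, hnj]
      · exact absurd ⟨j, hnj, hmj⟩ hcon
    · rcases Bool.eq_false_or_eq_true (m.testBit j) with hmj | hmj
      · exact absurd (hsub j hmj) (by simp [hnj])
      · rw [hmj, hnj]
  have hiB : i < B := by
    have h1 := Nat.ge_two_pow_of_testBit hin
    by_contra hc
    have h2 : 2 ^ B ≤ 2 ^ i := Nat.pow_le_pow_right (by omega) (by omega)
    omega
  rw [pvPc_card B m hm, pvPc_card B n hn]
  apply Finset.card_lt_card
  rw [Finset.ssubset_iff_of_subset]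
  · exact ⟨i, by simp [Finset.mem_filter, Finset.mem_range, hiB, hin], by simp [him]⟩
  · intro j hj
    simp only [Finset.mem_filter, Finset.mem_range] at hj ⊢
    exact ⟨hj.1, hsub j hj.2⟩

-- total popcount of the table over all states — the termination measure
def pvSumPC (data : List String) (P : PySem.Dict (Char × Int × Int) Nat) : Nat :=
  ((pvAll data).map (fun s => PySem.Int.bitCount ((P.getD s 0 : Nat) : Int))).sum

theorem pvBound_of_sound (data : List String) {P : PySem.Dict (Char × Int × Int) Nat}
    (hsound : pvSound data P) {s : Char × Int × Int} (hs : pvValid data s) :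
    P.getD s 0 < 2 ^ (pvRows data * (pvCols data).toNat) := by
  apply pvMask_lt
  intro i hi
  obtain ⟨t, hr, rfl⟩ := hsound s hs i hi
  have hvt := pvReach_valid data hr hs
  exact pvIdxP_lt data hvt.2.1 hvt.2.2.1 hvt.2.2.2.1 hvt.2.2.2.2

theorem pvSumPC_le_of_tab (data : List String) {P Q : PySem.Dict (Char × Int × Int) Nat}
    (htab : pvTabLe P Q) (hsound : pvSound data Q) :
    pvSumPC data P ≤ pvSumPC data Q := by
  unfold pvSumPC
  apply List.sum_le_sum
  intro s hs
  exact pvPc_le (htab s) (pvBound_of_sound data hsound ((mem_pvAll_iff data s).mp hs))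

theorem pvSumPC_lt (data : List String) {P Q : PySem.Dict (Char × Int × Int) Nat}
    (htab : pvTabLe P Q) (hsound : pvSound data Q) {s : Char × Int × Int}
    (hs : pvValid data s) (hne : P.getD s 0 ≠ Q.getD s 0) :
    pvSumPC data P < pvSumPC data Q := by
  unfold pvSumPC
  apply List.sum_lt_sum
  · intro t ht
    exact pvPc_le (htab t) (pvBound_of_sound data hsound ((mem_pvAll_iff data t).mp ht))
  · refine ⟨s, (mem_pvAll_iff data s).mpr hs, ?_⟩
    exact pvPc_lt (htab s) hne (pvBound_of_sound data hsound hs)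

theorem pvSumPC_le_total (data : List String) {P : PySem.Dict (Char × Int × Int) Nat}
    (hsound : pvSound data P) :
    pvSumPC data P ≤
      4 * pvRows data * (pvCols data).toNat * (pvRows data * (pvCols data).toNat) := by
  unfold pvSumPC
  have hbound : ∀ s ∈ pvAll data,
      PySem.Int.bitCount ((P.getD s 0 : Nat) : Int) ≤ pvRows data * (pvCols data).toNat := by
    intro s hs
    have hv := (mem_pvAll_iff data s).mp hs
    rw [pvPc_card _ _ (pvBound_of_sound data hsound hv)]
    calc ((Finset.range _).filter _).card ≤ (Finset.range (pvRows data * (pvCols data).toNat)).card :=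
          Finset.card_le_card (Finset.filter_subset _ _)
      _ = pvRows data * (pvCols data).toNat := Finset.card_range _
  calc ((pvAll data).map (fun s => PySem.Int.bitCount ((P.getD s 0 : Nat) : Int))).sum
      ≤ (((pvAll data).map (fun _ => pvRows data * (pvCols data).toNat)).sum) := by
        apply List.sum_le_sum
        intro s hs
        exact hbound s hs
    _ = (pvAll data).length * (pvRows data * (pvCols data).toNat) := by
        simp [List.map_const', List.sum_replicate]
    _ = 4 * pvRows data * (pvCols data).toNat * (pvRows data * (pvCols data).toNat) := by
        rw [length_pvAll]

-- ---- the sweep: invariants, changed-flag semantics, strict growth ----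

theorem pvSweepFold_inv (data : List String) :
    ∀ (l : List (Char × Int × Int)) (P : PySem.Dict (Char × Int × Int) Nat) (flag : Bool),
      (∀ s ∈ l, pvValid data s) → pvPost data P → pvSound data P →
      (pvPost data (l.foldl
          (fun acc s =>
            if pvFval data acc.1 s = acc.1.getD s 0 then acc
            else (acc.1.insert s (pvFval data acc.1 s), true)) (P, flag)).1 ∧
       pvSound data (l.foldl
          (fun acc s =>
            if pvFval data acc.1 s = acc.1.getD s 0 then acc
            else (acc.1.insert s (pvFval data acc.1 s), true)) (P, flag)).1 ∧
       pvTabLe P (l.foldl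
          (fun acc s =>
            if pvFval data acc.1 s = acc.1.getD s 0 then acc
            else (acc.1.insert s (pvFval data acc.1 s), true)) (P, flag)).1 ∧
       ((l.foldl
          (fun acc s =>
            if pvFval data acc.1 s = acc.1.getD s 0 then acc
            else (acc.1.insert s (pvFval data acc.1 s), true)) (P, flag)).2 = false →
          (l.foldl
          (fun acc s =>
            if pvFval data acc.1 s = acc.1.getD s 0 then acc
            else (acc.1.insert s (pvFval data acc.1 s), true)) (P, flag)).1 = P ∧
          flag = false ∧ ∀ s ∈ l, pvFval data P s = P.getD s 0) ∧
       (flag = false →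
          (l.foldl
          (fun acc s =>
            if pvFval data acc.1 s = acc.1.getD s 0 then acc
            else (acc.1.insert s (pvFval data acc.1 s), true)) (P, flag)).2 = true →
          pvSumPC data P < pvSumPC data (l.foldl
          (fun acc s =>
            if pvFval data acc.1 s = acc.1.getD s 0 then acc
            else (acc.1.insert s (pvFval data acc.1 s), true)) (P, flag)).1)) := by
  intro l
  induction l with
  | nil =>
    intro P flag _ hpost hsound
    refine ⟨hpost, hsound, fun s => pvBitSub_refl _, fun h => ⟨rfl, by simpa using h, by simp⟩,
      fun h1 h2 => by simp at h1 h2; rw [h1] at h2; cases h2⟩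
  | cons s t ih =>
    intro P flag hval hpost hsound
    have hvs : pvValid data s := hval s List.mem_cons_self
    have hvt : ∀ u ∈ t, pvValid data u := fun u hu => hval u (List.mem_cons_of_mem _ hu)
    simp only [List.foldl_cons]
    by_cases heq : pvFval data P s = P.getD s 0
    · rw [if_pos heq]
      obtain ⟨p1, p2, p3, p4, p5⟩ := ih P flag hvt hpost hsound
      refine ⟨p1, p2, p3, ?_, p5⟩
      intro hf
      obtain ⟨q1, q2, q3⟩ := p4 hf
      refine ⟨q1, q2, ?_⟩
      intro u hu
      rcases List.mem_cons.mp hu with rfl | hu'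
      · exact heq
      · exact q3 u hu'
    · rw [if_neg heq]
      obtain ⟨u1, u2, u3⟩ := pvUpdate_inv data P s hvs hpost hsound
      obtain ⟨p1, p2, p3, p4, p5⟩ := ih (P.insert s (pvFval data P s)) true hvt u1 u2
      refine ⟨p1, p2, fun w i hi => p3 w i (u3 w i hi), ?_, ?_⟩
      · intro hf
        obtain ⟨_, hcontra, _⟩ := p4 hf
        cases hcontra
      · intro _ _
        have hgrow : pvSumPC data P < pvSumPC data (P.insert s (pvFval data P s)) := by
          apply pvSumPC_lt data u3 u2 hvs
          rw [PySem.Dict.getD_insert, if_pos rfl]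
          exact fun hc => heq hc.symm
        have hle : pvSumPC data (P.insert s (pvFval data P s)) ≤ pvSumPC data _ :=
          pvSumPC_le_of_tab data p3 p2
        omega

-- ---- the outer while-loop reaches the least fixed point ----

theorem pvIterB_fix (data : List String) :
    ∀ (fuel : Nat) (P : PySem.Dict (Char × Int × Int) Nat),
      pvPost data P → pvSound data P →
      4 * pvRows data * (pvCols data).toNat * (pvRows data * (pvCols data).toNat) + 1 ≤
        fuel + pvSumPC data P →
      pvSound data (pvIterB data fuel P) ∧
      ∀ s, pvValid data s →
        pvFval data (pvIterB data fuel P) s = (pvIterB data fuel P).getD s 0 := by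
  intro fuel
  induction fuel with
  | zero =>
    intro P _ hsound hfuel
    have := pvSumPC_le_total data hsound
    omega
  | succ f ih =>
    intro P hpost hsound hfuel
    have hval : ∀ s ∈ pvOrder data, pvValid data s :=
      fun s hs => (mem_pvOrder_iff data s).mp hs
    obtain ⟨p1, p2, p3, p4, p5⟩ := pvSweepFold_inv data (pvOrder data) P false hval hpost hsound
    have hPS : pvSweep data P =
        (pvOrder data).foldl
          (fun acc s =>
            if pvFval data acc.1 s = acc.1.getD s 0 then acc
            else (acc.1.insert s (pvFval data acc.1 s), true)) (P, false) := rfl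
    have hstep : pvIterB data (f + 1) P =
        if (pvSweep data P).2 then pvIterB data f (pvSweep data P).1 else P := rfl
    rw [hstep]
    by_cases hc : (pvSweep data P).2 = true
    · rw [if_pos hc]
      rw [hPS] at hc
      have hgrow := p5 rfl hc
      refine ih (pvSweep data P).1 (by rw [hPS]; exact p1) (by rw [hPS]; exact p2) ?_
      rw [hPS]
      omega
    · simp only [Bool.not_eq_true] at hc
      rw [if_neg (by simp [hc])]
      rw [hPS] at hc
      obtain ⟨-, -, q3⟩ := p4 hc
      exact ⟨hsound, fun s hs => q3 s ((mem_pvOrder_iff data s).mpr hs)⟩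

-- the initial table: bit(s) at every valid state
theorem pvDict_foldl_insert_get? {α β : Type} [BEq α] [LawfulBEq α]
    (l : List α) (f : α → β) :
    ∀ (d0 : PySem.Dict α β) (s : α),
      (l.foldl (fun d x => d.insert x (f x)) d0).get? s =
        if s ∈ l then some (f s) else d0.get? s := by
  induction l with
  | nil => intro d0 s; simp
  | cons a t ih =>
    intro d0 s
    simp only [List.foldl_cons, ih, List.mem_cons]
    by_cases hst : s ∈ t
    · simp [hst]
    · by_cases hsa : s = a
      · subst hsa
        simp [hst, PySem.Dict.get?_insert_self]
      · rw [if_neg hst, if_neg (by simp [hsa, hst]),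
          PySem.Dict.get?_insert_of_ne _ _ hsa]

theorem pvInitB_getD (data : List String) (s : Char × Int × Int) (hs : pvValid data s) :
    (pvInitB data).getD s 0 = pvBit data s := by
  unfold pvInitB
  rw [PySem.Dict.getD_eq_get?_getD, pvDict_foldl_insert_get?,
    if_pos ((mem_pvOrder_iff data s).mpr hs)]
  rfl

theorem pvInitB_post (data : List String) : pvPost data (pvInitB data) := by
  intro s hs i hi
  rw [pvInitB_getD data s hs] at hi
  rw [testBit_pvFval]
  unfold pvBit at hi
  rw [Nat.testBit_two_pow] at hi
  exact Or.inl (of_decide_eq_true hi)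

theorem pvInitB_sound (data : List String) : pvSound data (pvInitB data) := by
  intro s hs i hi
  rw [pvInitB_getD data s hs] at hi
  unfold pvBit at hi
  rw [Nat.testBit_two_pow] at hi
  exact ⟨s, Relation.ReflTransGen.refl, (of_decide_eq_true hi).symm⟩

-- at the fixed point, the mask at a valid state holds exactly the positions reachable from it
theorem pvFix_char (data : List String) {R : PySem.Dict (Char × Int × Int) Nat}
    (hsound : pvSound data R)
    (hfix : ∀ s, pvValid data s → pvFval data R s = R.getD s 0)
    {s : Char × Int × Int} (hs : pvValid data s) (i : Nat) :
    (R.getD s 0).testBit i = true ↔ ∃ t, pvReach data s t ∧ i = pvIdxP data t.2 := by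
  constructor
  · exact hsound s hs i
  · rintro ⟨t, hr, rfl⟩
    unfold pvReach at hr
    revert hs
    induction hr using Relation.ReflTransGen.head_induction_on with
    | refl =>
      intro ht
      rw [← hfix t ht, testBit_pvFval]
      exact Or.inl rfl
    | head hstep htail ihc =>
      intro ha
      rename_i a c
      have hvc : pvValid data c := pvStep_valid data ha.1 hstep
      rw [← hfix a ha, testBit_pvFval]
      exact Or.inr ⟨c, hstep, ihc hvc⟩

-- ---- per-entry-point equality: A's count = popcount of B's mask at the start state ----

theorem energized_eq (data : List String) (v : Char) (p : Int × Int)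
    (hval : pvValid data (v, p.1, p.2)) :
    energized_tiles data v p =
      (PySem.Int.bitCount
        (((pvIterB data
            (4 * pvRows data * (pvCols data).toNat * (pvRows data * (pvCols data).toNat) + 1)
            (pvInitB data)).getD (v, p.1, p.2) 0 : Nat) : Int) : Int) := by
  -- A side: the final dict holds exactly the states reachable from (v, p)
  set beams := (rotGet v (pvSym data p.1 p.2)).map
    (fun _ => (v, p.1, p.2)) with hbeams_def
  have hbeams_mem : ∀ b ∈ beams, b = (v, p.1, p.2) := by
    intro b hb
    rw [hbeams_def] at hb
    obtain ⟨_, _, rfl⟩ := List.mem_map.mp hb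
    rfl
  have hbeams_ne : beams ≠ [] := by
    rw [hbeams_def]
    simp [rotGet_ne_nil]
  set dA := pvLoopA data (2 * (4 * pvRows data * (pvCols data).toNat) + 2)
    PySem.Dict.empty beams with hdA_def
  have hcharA : ∀ s, pvMemA s dA = true ↔ pvReach data (v, p.1, p.2) s := by
    intro s
    rw [hdA_def, pvLoopA_char data _ PySem.Dict.empty beams
      (fun s' hs' => by rw [pvMemA_empty] at hs'; cases hs')
      (fun b hb => by rw [hbeams_mem b hb]; exact hval)
      (fun s' hs' => by rw [pvMemA_empty] at hs'; cases hs')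
      (by have := pvMissA_le data (PySem.Dict.empty (κ := Int × Int) (ν := PySem.Set Char))
          omega) s]
    simp only [pvMemA_empty, Bool.false_eq_true, false_or]
    constructor
    · rintro ⟨b, hb, hr⟩
      rw [hbeams_mem b hb] at hr
      exact hr
    · intro hr
      obtain ⟨b, hb⟩ := List.exists_mem_of_ne_nil _ hbeams_ne
      exact ⟨b, hb, (hbeams_mem b hb) ▸ hr⟩
  have hgoodA : pvGood dA := by
    rw [hdA_def]
    refine pvLoopA_good data _ _ _ ⟨PySem.Dict.nodup_keys_empty, fun q => ?_⟩
    simp [PySem.Dict.keys_empty, pvMemA_empty]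
  -- B side: the fixed-point table
  set R := pvIterB data
    (4 * pvRows data * (pvCols data).toNat * (pvRows data * (pvCols data).toNat) + 1)
    (pvInitB data) with hR_def
  obtain ⟨hsR, hfixR⟩ := pvIterB_fix data _ (pvInitB data)
    (pvInitB_post data) (pvInitB_sound data) (Nat.le_add_right _ _)
  set m := R.getD (v, p.1, p.2) 0 with hm_def
  have hmlt : m < 2 ^ (pvRows data * (pvCols data).toNat) :=
    pvBound_of_sound data hsR hval
  have hchar := pvFix_char data hsR hfixR hval
  -- the positions with a set bit are exactly A's keys, carried over by the injective index map
  have hkeys : ∀ q : Int × Int, q ∈ dA.keys ↔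
      ∃ v', pvReach data (v, p.1, p.2) (v', q.1, q.2) := by
    intro q
    rw [hgoodA.2 q]
    constructor
    · rintro ⟨v', hv'⟩; exact ⟨v', (hcharA _).mp hv'⟩
    · rintro ⟨v', hv'⟩; exact ⟨v', (hcharA _).mpr hv'⟩
  have hvalid_keys : ∀ q ∈ dA.keys,
      0 ≤ q.1 ∧ q.1 < (pvRows data : Int) ∧ 0 ≤ q.2 ∧ q.2 < pvCols data := by
    intro q hq
    obtain ⟨v', hv'⟩ := (hkeys q).mp hq
    have := pvReach_valid data hv' hval
    exact ⟨this.2.1, this.2.2.1, this.2.2.2.1, this.2.2.2.2⟩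
  have hset : (Finset.range (pvRows data * (pvCols data).toNat)).filter
      (fun i => m.testBit i = true) = dA.keys.toFinset.image (pvIdxP data) := by
    ext i
    simp only [Finset.mem_filter, Finset.mem_range, Finset.mem_image, List.mem_toFinset]
    constructor
    · rintro ⟨_, hbit⟩
      obtain ⟨t, hr, rfl⟩ := (hchar _).mp hbit
      refine ⟨t.2, (hkeys t.2).mpr ⟨t.1, ?_⟩, rfl⟩
      simpa using hr
    · rintro ⟨q, hq, rfl⟩
      obtain ⟨hq1, hq2, hq3, hq4⟩ := hvalid_keys q hq
      refine ⟨pvIdxP_lt data hq1 hq2 hq3 hq4, ?_⟩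
      obtain ⟨v', hv'⟩ := (hkeys q).mp hq
      exact (hchar _).mpr ⟨(v', q.1, q.2), hv', rfl⟩
  have hinj : Set.InjOn (pvIdxP data) ↑dA.keys.toFinset := by
    intro q1 hq1 q2 hq2 h
    simp only [Finset.mem_coe, List.mem_toFinset] at hq1 hq2
    obtain ⟨a1, b1, c1, d1⟩ := hvalid_keys q1 hq1
    obtain ⟨a2, b2, c2, d2⟩ := hvalid_keys q2 hq2
    exact pvIdxP_inj data ⟨a1, c1, d1⟩ ⟨a2, c2, d2⟩ h
  have hcardeq : ((Finset.range (pvRows data * (pvCols data).toNat)).filter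
      (fun i => m.testBit i = true)).card = dA.keys.length := by
    rw [hset, Finset.card_image_of_injOn hinj, List.toFinset_card_of_nodup hgoodA.1]
  have hsize : dA.size = dA.keys.length := by
    simp [PySem.Dict.keys, PySem.Dict.size]
  show (dA.size : Int) = _
  rw [hsize, ← hcardeq, ← pvPc_card _ m hmlt]

-- ---- the outer maximum ----

theorem pv_foldl_maxmax (f g : Int → Int) :
    ∀ (l : List Int) (acc : Int),
      l.foldl (fun r i => max (max r (f i)) (g i)) acc =
        (l.flatMap (fun i => [f i, g i])).foldl max acc := by
  intro l
  induction l with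
  | nil => intro acc; simp
  | cons a t ih =>
    intro acc
    rw [List.flatMap_cons, List.foldl_append, List.foldl_cons, ih]
    rfl

theorem pv_maxD_cons (x : Int) (t : List Int) (hx : 0 ≤ x) :
    PySem.List.maxD (x :: t) (fun y => y) 0 = List.foldl max 0 (x :: t) := by
  unfold PySem.List.maxD
  rw [PySem.List.max?_id_cons]
  simp only [Option.getD_some, List.foldl_cons]
  rw [max_eq_right hx]

theorem max_energized_tiles_spec : Claim_equal_max_energized_tiles := by
  unfold Claim_equal_max_energized_tiles Spec_max_energized_tiles
  intro data _ hpre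
  obtain ⟨hne, hcols, _⟩ := hpre
  have hrows : 0 < pvRows data := List.length_pos_of_ne_nil hne
  have hv : ∀ (v : Char) (x y : Int), v ∈ pvViews → 0 ≤ x → x < (pvRows data : Int) →
      0 ≤ y → y < pvCols data → pvValid data (v, x, y) :=
    fun _ _ _ a b c d e => ⟨a, b, c, d, e⟩
  set R := pvIterB data
    (4 * pvRows data * (pvCols data).toNat * (pvRows data * (pvCols data).toNat) + 1)
    (pvInitB data) with hR_def
  have h1 : ∀ i ∈ PySem.List.pyRange 0 (pvRows data : Int) 1,
      [energized_tiles data '>' (i, 0), energized_tiles data '<' (i, pvCols data - 1)] =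
      [(PySem.Int.bitCount ((R.getD ('>', i, 0) 0 : Nat) : Int) : Int),
       (PySem.Int.bitCount ((R.getD ('<', i, pvCols data - 1) 0 : Nat) : Int) : Int)] := by
    intro i hi
    rw [PySem.List.mem_pyRange_one] at hi
    rw [energized_eq data '>' (i, 0)
        (hv _ _ _ (by simp [pvViews]) hi.1 hi.2 le_rfl hcols),
      energized_eq data '<' (i, pvCols data - 1)
        (hv _ _ _ (by simp [pvViews]) hi.1 hi.2 (by omega) (by omega))]
  have h2 : ∀ j ∈ PySem.List.pyRange 0 (pvCols data) 1,
      [energized_tiles data 'v' (0, j), energized_tiles data '^' ((pvRows data : Int) - 1, j)] =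
      [(PySem.Int.bitCount ((R.getD ('v', 0, j) 0 : Nat) : Int) : Int),
       (PySem.Int.bitCount ((R.getD ('^', (pvRows data : Int) - 1, j) 0 : Nat) : Int) : Int)] := by
    intro j hj
    rw [PySem.List.mem_pyRange_one] at hj
    rw [energized_eq data 'v' (0, j)
        (hv _ _ _ (by simp [pvViews]) le_rfl (by show (0 : Int) < (pvRows data : Int); exact_mod_cast hrows) hj.1 hj.2),
      energized_eq data '^' ((pvRows data : Int) - 1, j)
        (hv _ _ _ (by simp [pvViews]) (by omega) (by omega) hj.1 hj.2)]
  unfold max_energized_tiles max_energized_tiles_alt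
  rw [pv_foldl_maxmax (fun i => energized_tiles data '>' (i, 0))
      (fun i => energized_tiles data '<' (i, pvCols data - 1)),
    pv_foldl_maxmax (fun j => energized_tiles data 'v' (0, j))
      (fun j => energized_tiles data '^' ((pvRows data : Int) - 1, j)),
    ← List.foldl_append,
    List.flatMap_congr h1, List.flatMap_congr h2]
  simp only [List.map_append, List.map_flatMap, List.map_cons, List.map_nil, ← hR_def]
  have hz : (0 : Int) < (pvRows data : Int) := by exact_mod_cast hrows
  rw [PySem.List.pyRange_one_cons hz]
  simp only [List.flatMap_cons, List.cons_append, List.append_assoc]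
  rw [pv_maxD_cons _ _ (Int.natCast_nonneg _)]
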